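-- pv_equiv track=rewrite | github.com/MichalCervenansky/lightroom-mcp | scripts/batch_rating_workflow.py | generate_batch_commands
-- ===== SOURCE A (Python) =====
-- def calculate_local_id(filename: str, base_filename: str, base_local_id: int) -> int:
--     """
--     Calculate Lightroom localId from filename pattern.
--
--     Lightroom assigns sequential localIds during import. If you know the
--     localId of one file, you can calculate others based on file order.
--
--     This eliminates the need for find_photo_by_filename MCP calls.
--
--     Args:
--         filename: Target filename (e.g., "DSCF4022")
--         base_filename: Known filename (e.g., "DSCF3987")
--         base_local_id: Known localId for base_filename
--
--     Returns:
--         Calculated localId for target filename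
--     """
--     # Extract numeric parts
--     base_num = int(''.join(filter(str.isdigit, base_filename)))
--     target_num = int(''.join(filter(str.isdigit, filename)))
--
--     # Calculate offset, accounting for any gaps in numbering
--     # For Fuji cameras, there's no frame 4000 (skips from 3999 to 4001)
--     offset = target_num - base_num
--
--     # Adjust for known gaps (customize based on your camera)
--     if base_num < 4000 <= target_num:
--         offset -= 1  # Account for missing 4000
--
--     return base_local_id + offset
--
-- def generate_batch_commands(ratings: dict[str, int], base_filename: str, base_local_id: int) -> dict[int, list[int]]:
--     """
--     Group photos by rating and generate batch select commands.
--
--     Instead of calling select_photos + set_rating for each photo (2N calls),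
--     we group by rating and apply once per rating level (2*5 = 10 calls max).
--
--     Args:
--         ratings: Dict mapping filename stems to ratings (e.g., {"DSCF3987": 3})
--         base_filename: Known filename for localId calculation
--         base_local_id: Known localId
--
--     Returns:
--         Dict mapping rating -> list of localIds
--     """
--     by_rating = {1: [], 2: [], 3: [], 4: [], 5: []}
--
--     for filename, rating in ratings.items():
--         if rating < 1 or rating > 5:
--             continue
--         local_id = calculate_local_id(filename, base_filename, base_local_id)
--         by_rating[rating].append(local_id)
--
--     # Remove empty ratings
--     return {r: ids for r, ids in by_rating.items() if ids}
-- ===== SOURCE B (Python) =====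
-- def calculate_local_id(filename: str, base_filename: str, base_local_id: int) -> int:
--     base_num = int(''.join(filter(str.isdigit, base_filename)))
--     target_num = int(''.join(filter(str.isdigit, filename)))
--     offset = target_num - base_num
--     if base_num < 4000 <= target_num:
--         offset -= 1
--     return base_local_id + offset
--
--
-- def generate_batch_commands(ratings: dict, base_filename: str, base_local_id: int) -> dict:
--     result = {}
--     for r in range(1, 6):
--         ids = [calculate_local_id(f, base_filename, base_local_id)
--                for f, rating in ratings.items() if rating == r]
--         if ids:
--             result[r] = ids
--     return result
-- ===== Notes on version B (the rewrite author's own statement) =====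
-- stated objective: alternative
-- what changed: Replaced the single-pass five-bucket dispatch dict with an outer loop over ratings 1..5, each building its bucket by one filtered comprehension over the dict and inserting only non-empty buckets.
import Mathlib
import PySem

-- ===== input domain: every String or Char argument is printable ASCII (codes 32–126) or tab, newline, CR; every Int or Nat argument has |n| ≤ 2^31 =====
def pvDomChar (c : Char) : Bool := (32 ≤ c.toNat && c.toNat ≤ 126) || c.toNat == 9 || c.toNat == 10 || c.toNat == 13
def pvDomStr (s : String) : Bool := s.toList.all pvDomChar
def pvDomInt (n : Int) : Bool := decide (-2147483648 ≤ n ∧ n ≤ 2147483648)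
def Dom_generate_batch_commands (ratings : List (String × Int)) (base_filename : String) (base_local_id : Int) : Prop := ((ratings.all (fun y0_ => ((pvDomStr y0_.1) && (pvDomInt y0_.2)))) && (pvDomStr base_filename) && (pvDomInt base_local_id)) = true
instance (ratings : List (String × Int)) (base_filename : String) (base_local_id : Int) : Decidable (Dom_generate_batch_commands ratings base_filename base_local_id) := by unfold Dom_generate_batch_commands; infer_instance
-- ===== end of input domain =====

-- B groups by an outer loop over ratings 1..5 with one filtered scan per rating instead of A's
-- single-pass five-bucket dispatch; same return value everywhere A returns (objective: alternative).


-- ===== PORT A =====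
-- int(''.join(filter(str.isdigit, s))); Pre_ guarantees the digit string is non-empty, so getD 0 is never the value used
def pvDigits (s : String) : List Char := s.toList.filter PySem.Chars.isdigit

def calculate_local_id (filename : String) (base_filename : String) (base_local_id : Int) : Int :=
  let base_num := (PySem.Int.ofChars? (pvDigits base_filename)).getD 0
  let target_num := (PySem.Int.ofChars? (pvDigits filename)).getD 0
  let offset := target_num - base_num
  let offset := if base_num < 4000 ∧ 4000 ≤ target_num then offset - 1 else offset
  base_local_id + offset

-- loop body of A: dispatch into the five buckets of by_rating
def pvStepA (base_filename : String) (base_local_id : Int)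
    (st : List Int × List Int × List Int × List Int × List Int) (p : String × Int) :
    List Int × List Int × List Int × List Int × List Int :=
  if p.2 < 1 ∨ p.2 > 5 then st
  else
    let lid := calculate_local_id p.1 base_filename base_local_id
    let (l1, l2, l3, l4, l5) := st
    if p.2 = 1 then (l1 ++ [lid], l2, l3, l4, l5)
    else if p.2 = 2 then (l1, l2 ++ [lid], l3, l4, l5)
    else if p.2 = 3 then (l1, l2, l3 ++ [lid], l4, l5)
    else if p.2 = 4 then (l1, l2, l3, l4 ++ [lid], l5)
    else (l1, l2, l3, l4, l5 ++ [lid])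

def generate_batch_commands (ratings : List (String × Int)) (base_filename : String) (base_local_id : Int) : List (Int × List Int) :=
  let st := ratings.foldl (pvStepA base_filename base_local_id) ([], [], [], [], [])
  let (l1, l2, l3, l4, l5) := st
  [((1 : Int), l1), (2, l2), (3, l3), (4, l4), (5, l5)].filter (fun p => !p.2.isEmpty)

-- ===== PORT B =====
def generate_batch_commands_alt (ratings : List (String × Int)) (base_filename : String) (base_local_id : Int) : List (Int × List Int) :=
  [(1 : Int), 2, 3, 4, 5].filterMap (fun r =>
    let ids := ratings.filterMap (fun p =>
      if p.2 = r then some (calculate_local_id p.1 base_filename base_local_id) else none)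
    if ids.isEmpty then none else some (r, ids))

-- ===== PRECONDITION & SPEC =====
-- Pre_ excludes exactly the inputs on which Python A raises ValueError: an entry with rating in
-- 1..5 whose filename (or base_filename, when such an entry exists) contains no digit, so that
-- int('') is attempted; B raises identically there.
def Pre_generate_batch_commands (ratings : List (String × Int)) (base_filename : String) (base_local_id : Int) : Prop :=
  ∀ p ∈ ratings, (1 ≤ p.2 ∧ p.2 ≤ 5) → (pvDigits base_filename ≠ [] ∧ pvDigits p.1 ≠ [])
instance (ratings : List (String × Int)) (base_filename : String) (base_local_id : Int) : Decidable (Pre_generate_batch_commands ratings base_filename base_local_id) := by unfold Pre_generate_batch_commands; infer_instance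

def pvWitness_generate_batch_commands : (List (String × Int)) × String × Int :=
  ([("DSCF3999", 3), ("DSCF4001", 3), ("DSCF4002", 5), ("junk", 0)], "DSCF3987", 100)

def Spec_generate_batch_commands (ratings : List (String × Int)) (base_filename : String) (base_local_id : Int) (out : List (Int × List Int)) : Prop := out = generate_batch_commands_alt ratings base_filename base_local_id
instance (ratings : List (String × Int)) (base_filename : String) (base_local_id : Int) (out : List (Int × List Int)) : Decidable (Spec_generate_batch_commands ratings base_filename base_local_id out) := by unfold Spec_generate_batch_commands; infer_instance

-- ===== CLAIM (what is proved, stated in full; the proofs are below) =====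
def Claim_equal_generate_batch_commands : Prop := ∀ (ratings : List (String × Int)) (base_filename : String) (base_local_id : Int), Dom_generate_batch_commands ratings base_filename base_local_id → Pre_generate_batch_commands ratings base_filename base_local_id → Spec_generate_batch_commands ratings base_filename base_local_id (generate_batch_commands ratings base_filename base_local_id)

-- ===== LEMMAS AND PROOFS =====
-- the bucket of rating r, as B computes it
def pvBucket (ratings : List (String × Int)) (base_filename : String) (base_local_id : Int) (r : Int) : List Int :=
  ratings.filterMap (fun p =>
    if p.2 = r then some (calculate_local_id p.1 base_filename base_local_id) else none)

theorem pvFold_buckets (ratings : List (String × Int)) (bf : String) (bl : Int)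
    (l1 l2 l3 l4 l5 : List Int) :
    ratings.foldl (pvStepA bf bl) (l1, l2, l3, l4, l5) =
      (l1 ++ pvBucket ratings bf bl 1, l2 ++ pvBucket ratings bf bl 2,
       l3 ++ pvBucket ratings bf bl 3, l4 ++ pvBucket ratings bf bl 4,
       l5 ++ pvBucket ratings bf bl 5) := by
  induction ratings generalizing l1 l2 l3 l4 l5 with
  | nil => simp [pvBucket]
  | cons p t ih =>
    obtain ⟨f, r⟩ := p
    have hb : ∀ i : Int, r ≠ i → pvBucket ((f, r) :: t) bf bl i = pvBucket t bf bl i := by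
      intro i hi; simp [pvBucket, hi]
    have hb2 : ∀ i : Int, r = i →
        pvBucket ((f, r) :: t) bf bl i =
          calculate_local_id f bf bl :: pvBucket t bf bl i := by
      intro i hi; simp [pvBucket, hi]
    simp only [List.foldl_cons, pvStepA]
    split_ifs with h h1 h2 h3 h4
    · rw [hb 1 (by omega), hb 2 (by omega), hb 3 (by omega), hb 4 (by omega), hb 5 (by omega)]
      exact ih l1 l2 l3 l4 l5
    · rw [hb2 1 h1, hb 2 (by omega), hb 3 (by omega), hb 4 (by omega), hb 5 (by omega), ih]
      simp
    · rw [hb 1 (by omega), hb2 2 h2, hb 3 (by omega), hb 4 (by omega), hb 5 (by omega), ih]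
      simp
    · rw [hb 1 (by omega), hb 2 (by omega), hb2 3 h3, hb 4 (by omega), hb 5 (by omega), ih]
      simp
    · rw [hb 1 (by omega), hb 2 (by omega), hb 3 (by omega), hb2 4 h4, hb 5 (by omega), ih]
      simp
    · rw [hb 1 (by omega), hb 2 (by omega), hb 3 (by omega), hb 4 (by omega),
        hb2 5 (by omega), ih]
      simp

theorem generate_batch_commands_eq (ratings : List (String × Int)) (bf : String) (bl : Int) :
    generate_batch_commands ratings bf bl = generate_batch_commands_alt ratings bf bl := by
  unfold generate_batch_commands generate_batch_commands_alt
  rw [pvFold_buckets]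
  simp only [List.nil_append]
  show _ = [(1:Int),2,3,4,5].filterMap (fun r => if (pvBucket ratings bf bl r).isEmpty then none
      else some (r, pvBucket ratings bf bl r))
  simp only [List.filter, List.filterMap]
  cases (pvBucket ratings bf bl 1).isEmpty <;> cases (pvBucket ratings bf bl 2).isEmpty <;>
    cases (pvBucket ratings bf bl 3).isEmpty <;> cases (pvBucket ratings bf bl 4).isEmpty <;>
    cases (pvBucket ratings bf bl 5).isEmpty <;> simp_all

-- ===== VERDICT (by name: the statement is the Claim_ definition above) =====
theorem generate_batch_commands_spec : Claim_equal_generate_batch_commands := by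
  intro ratings bf bl _ _
  unfold Spec_generate_batch_commands
  exact generate_batch_commands_eq ratings bf bl
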